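-- pv_equiv track=rewrite | github.com/steviejrdn/opentab | opentab/core/code_parser.py | _split_by_operator
-- ===== SOURCE A (Python) =====
-- def _split_by_operator(expression, operator):
--     result = []
--     current = ''
--     i = 0
--     while i < len(expression):
--         if operator == '.' and expression[i] == '.' and i + 1 < len(expression) and expression[i+1] == '.':
--             current += '..'
--             i += 2
--             continue
--
--         if expression[i] == operator:
--             if current.strip():
--                 result.append(current.strip())
--             current = ''
--         else:
--             current += expression[i]
--         i += 1
--     if current.strip():
--         result.append(current.strip())
--     return result
-- ===== SOURCE B (Python) =====
-- def _split_by_operator(expression, operator):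
--     tokens = _tokenize(expression, operator)
--     parts = _split_tokens(tokens, operator)
--     return [s for s in (''.join(p).strip() for p in parts) if s]
--
--
-- def _tokenize(expression, operator):
--     # Phase 1: token stream; for the '.' operator, pair consecutive dots
--     # greedily left-to-right so '..' survives as a single non-operator token.
--     if operator != '.':
--         return list(expression)
--     tokens = []
--     pending = False
--     for ch in expression:
--         if ch == '.':
--             if pending:
--                 tokens.append('..')
--                 pending = False
--             else:
--                 pending = True
--         else:
--             if pending:
--                 tokens.append('.')
--                 pending = False
--             tokens.append(ch)
--     if pending:
--         tokens.append('.')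
--     return tokens
--
--
-- def _split_tokens(tokens, operator):
--     # Phase 2: partition the token list at operator tokens.
--     parts = [[]]
--     for tok in tokens:
--         if tok == operator:
--             parts.append([])
--         else:
--             parts[-1].append(tok)
--     return parts
-- ===== Notes on version B (the rewrite author's own statement) =====
-- stated objective: faster
-- what changed: Replaces A's single index-based while-loop with manual '..' lookahead (i+1 check, i+=2) and repeated string concatenation by a three-phase pipeline: tokenize the string (pairing consecutive dots greedily when the operator is '.'), partition the token list at operator tokens by list appends, then join/strip/filter the parts with a comprehension.
import Mathlib
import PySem

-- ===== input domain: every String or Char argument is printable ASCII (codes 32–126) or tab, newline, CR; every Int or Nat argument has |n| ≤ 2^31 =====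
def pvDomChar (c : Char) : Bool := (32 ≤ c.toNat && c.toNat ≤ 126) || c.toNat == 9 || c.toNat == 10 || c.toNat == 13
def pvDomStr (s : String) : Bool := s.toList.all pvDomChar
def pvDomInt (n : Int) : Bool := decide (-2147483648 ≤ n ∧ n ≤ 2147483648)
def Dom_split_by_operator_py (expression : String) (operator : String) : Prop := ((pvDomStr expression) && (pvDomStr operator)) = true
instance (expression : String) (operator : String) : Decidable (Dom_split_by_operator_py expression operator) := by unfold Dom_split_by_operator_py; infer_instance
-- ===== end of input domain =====

-- B replaces A's index-lookahead while-loop with quadratic string concatenation by three phases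
-- (tokenize pairing '..', partition the token list at operator tokens, join/strip/filter);
-- same return value, measured faster in a timing run.

-- ===== PORT A =====
-- A's while-loop over the character indices, as structural recursion on the remaining
-- characters (the index lookahead expression[i+1] becomes rest.head?); state = (result, current).
def pvALoop (op : List Char) : List Char → List (List Char) → List Char → List (List Char)
  | [], res, cur =>
      if PySem.Chars.strip cur ≠ [] then res ++ [PySem.Chars.strip cur] else res
  | c :: rest, res, cur =>
      if op = ['.'] ∧ c = '.' ∧ rest.head? = some '.' then
        pvALoop op rest.tail res (cur ++ ['.', '.'])
      else if [c] = op then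
        pvALoop op rest
          (if PySem.Chars.strip cur ≠ [] then res ++ [PySem.Chars.strip cur] else res) []
      else
        pvALoop op rest res (cur ++ [c])
  termination_by cs _ _ => cs.length
  decreasing_by
  · simp [List.length_tail]
  · simp
  · simp

def split_by_operator_py (expression : String) (operator : String) : List String :=
  (pvALoop operator.toList expression.toList [] []).map (fun cs => String.ofList cs)

-- ===== PORT B =====
-- Phase 1 of Source B: token stream; for the '.' operator consecutive dots are paired
-- greedily left-to-right ('pending' = an unpaired dot seen).
def pvTokDot : List Char → Bool → List (List Char)
  | [], pending => if pending then [['.']] else []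
  | c :: rest, pending =>
      if c = '.' then
        if pending then ['.', '.'] :: pvTokDot rest false
        else pvTokDot rest true
      else
        (if pending then [['.']] else []) ++ [c] :: pvTokDot rest false

def pvTokenize (expr : List Char) (op : List Char) : List (List Char) :=
  if op ≠ ['.'] then expr.map (fun c => [c])
  else pvTokDot expr false

-- Phase 2 of Source B: partition the token list at operator tokens (parts[-1].append / parts.append([])).
def pvSplitTokens (op : List Char) (tokens : List (List Char)) : List (List (List Char)) :=
  tokens.foldl
    (fun parts tok =>
      if tok = op then parts ++ [[]]
      else parts.dropLast ++ [(parts.getLastD []) ++ [tok]])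
    [[]]

def split_by_operator_py_alt (expression : String) (operator : String) : List String :=
  ((((pvSplitTokens operator.toList (pvTokenize expression.toList operator.toList)).map
      (fun p => PySem.Chars.strip p.flatten)).filter (fun s => s ≠ [])).map
    (fun cs => String.ofList cs))

-- ===== PRECONDITION & SPEC =====
def Spec_split_by_operator_py (expression : String) (operator : String) (out : List String) : Prop := out = split_by_operator_py_alt expression operator
instance (expression : String) (operator : String) (out : List String) : Decidable (Spec_split_by_operator_py expression operator out) := by unfold Spec_split_by_operator_py; infer_instance

-- ===== CLAIM (what is proved, stated in full; the proofs are below) =====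
def Claim_equal_split_by_operator_py : Prop := ∀ (expression : String) (operator : String), Dom_split_by_operator_py expression operator → Spec_split_by_operator_py expression operator (split_by_operator_py expression operator)

-- ===== LEMMAS AND PROOFS =====

-- A's grouping behaviour restated on a token list (proof intermediate).
def pvGLoop (op : List Char) : List (List Char) → List (List Char) → List Char → List (List Char)
  | [], res, cur =>
      if PySem.Chars.strip cur ≠ [] then res ++ [PySem.Chars.strip cur] else res
  | t :: rest, res, cur =>
      if t = op then
        pvGLoop op rest
          (if PySem.Chars.strip cur ≠ [] then res ++ [PySem.Chars.strip cur] else res) []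
      else
        pvGLoop op rest res (cur ++ t)

-- Recursive form of phase 2 (proof intermediate).
def pvSplitRec (op : List Char) : List (List Char) → List (List Char) → List (List (List Char))
  | [], q => [q]
  | t :: rest, q =>
      if t = op then q :: pvSplitRec op rest []
      else pvSplitRec op rest (q ++ [t])

lemma pvTokDot_true_of_head_ne (rest : List Char) (h : rest.head? ≠ some '.') :
    pvTokDot rest true = ['.'] :: pvTokDot rest false := by
  cases rest with
  | nil => simp [pvTokDot]
  | cons c rt =>
    have hc : c ≠ '.' := by intro hc; exact h (by simp [hc])
    simp [pvTokDot, hc]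

-- A's char loop = A's grouping restated on B's token stream.
lemma pvALoop_eq_gLoop (op : List Char) (cs : List Char) (res : List (List Char))
    (cur : List Char) :
    pvALoop op cs res cur = pvGLoop op (pvTokenize cs op) res cur := by
  induction cs, res, cur using pvALoop.induct op with
  | case1 res cur hs =>
    by_cases hop : op = ['.'] <;> simp [pvALoop, pvTokenize, pvGLoop, pvTokDot, hop]
  | case2 res cur hs =>
    by_cases hop : op = ['.'] <;> simp [pvALoop, pvTokenize, pvGLoop, pvTokDot, hop]
  | case3 c rest res cur h ih =>
    obtain ⟨hop, hc, hh⟩ := h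
    obtain ⟨rt, hrt⟩ : ∃ rt, rest = '.' :: rt := by
      cases rest with
      | nil => simp at hh
      | cons a rt => simp at hh; exact ⟨rt, by simp [hh]⟩
    subst hop hc hrt
    simp only [List.tail_cons] at ih
    have e1 : pvALoop ['.'] ('.' :: '.' :: rt) res cur
        = pvALoop ['.'] rt res (cur ++ ['.', '.']) := by
      rw [pvALoop]; simp
    rw [e1, ih]
    simp [pvTokenize, pvTokDot, pvGLoop]
  | case4 c rest res cur h h2 ih =>
    simp only [dite_eq_ite] at ih
    rw [pvALoop]
    rw [if_neg h, if_pos h2, ih]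
    by_cases hop : op = ['.']
    · have hc : c = '.' := by subst hop; simpa using h2
      subst hop hc
      have hh : rest.head? ≠ some '.' := by
        intro hx; exact h ⟨rfl, rfl, hx⟩
      simp only [pvTokenize, if_neg (by simp : ¬(['.'] : List Char) ≠ ['.'])]
      simp only [pvTokDot]
      rw [pvTokDot_true_of_head_ne rest hh]
      simp [pvGLoop]
    · have hc : ¬ c = '.' := fun e => hop (by rw [← h2, e])
      simp [pvTokenize, pvGLoop, ← h2, hc]
  | case5 c rest res cur h h2 ih =>
    rw [pvALoop]
    rw [if_neg h, if_neg h2, ih]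
    by_cases hop : op = ['.']
    · have hc : c ≠ '.' := by
        intro hc; subst hop hc; exact h2 rfl
      subst hop
      simp [pvTokenize, pvTokDot, hc, pvGLoop, h2]
    · simp [pvTokenize, hop, pvGLoop, h2]

-- B's foldl phase 2, started from any parts list with last part q, appends pvSplitRec.
lemma pvSplitFold_eq_rec (op : List Char) (toks : List (List Char))
    (P : List (List (List Char))) (q : List (List Char)) :
    toks.foldl
      (fun parts tok =>
        if tok = op then parts ++ [[]]
        else parts.dropLast ++ [(parts.getLastD []) ++ [tok]])
      (P ++ [q]) = P ++ pvSplitRec op toks q := by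
  induction toks generalizing P q with
  | nil => simp [pvSplitRec]
  | cons t rest ih =>
    rw [List.foldl_cons, pvSplitRec]
    by_cases h : t = op
    · simp only [if_pos h]
      rw [show (P ++ [q]) ++ [([] : List (List Char))] = (P ++ [q]) ++ [[]] from rfl]
      rw [List.append_assoc P [q] [[]]] at *
      have := ih (P ++ [q]) []
      simpa [List.append_assoc] using this
    · simp only [if_neg h]
      have h1 : (P ++ [q]).dropLast = P := by simp
      have h2 : (P ++ [q]).getLastD [] = q := by simp
      rw [h1, h2, ih P (q ++ [t])]

-- A's grouping on tokens = strip-and-filter over the recursive partition.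
lemma pvGLoop_eq_filter (op : List Char) (toks : List (List Char))
    (res : List (List Char)) (q : List (List Char)) :
    pvGLoop op toks res q.flatten =
      res ++ ((pvSplitRec op toks q).map (fun p => PySem.Chars.strip p.flatten)).filter
        (fun s => s ≠ []) := by
  induction toks generalizing res q with
  | nil =>
    rw [pvGLoop, pvSplitRec]
    by_cases h : PySem.Chars.strip q.flatten = [] <;> simp [h, List.filter]
  | cons t rest ih =>
    rw [pvGLoop, pvSplitRec]
    by_cases h : t = op
    · simp only [if_pos h]
      have := ih (res := if PySem.Chars.strip q.flatten ≠ [] then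
          res ++ [PySem.Chars.strip q.flatten] else res) (q := [])
      simp only [List.flatten_nil] at this
      rw [this]
      by_cases hq : PySem.Chars.strip q.flatten = [] <;>
        simp [hq]
    · simp only [if_neg h]
      have hflat : q.flatten ++ t = (q ++ [t]).flatten := by simp
      rw [hflat, ih res (q ++ [t])]

-- ===== VERDICT (by name: the statement is the Claim_ definition above) =====
theorem split_by_operator_py_spec : Claim_equal_split_by_operator_py := by
  intro expression operator _
  unfold Spec_split_by_operator_py split_by_operator_py split_by_operator_py_alt
  rw [pvALoop_eq_gLoop]
  have hg := pvGLoop_eq_filter operator.toList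
    (pvTokenize expression.toList operator.toList) [] []
  simp only [List.flatten_nil] at hg
  rw [hg]
  unfold pvSplitTokens
  have hf := pvSplitFold_eq_rec operator.toList
    (pvTokenize expression.toList operator.toList) [] []
  simp only [List.nil_append] at hf
  rw [hf]
  simp only [List.nil_append]
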